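-- pv_equiv track=rewrite | github.com/KostyaSnigur/First_repo | Lesson05.py/task3/task5.py | get_phone_numbers_for_countries
-- ===== SOURCE A (Python) =====
-- def sanitize_phone_number(phone):
--     new_phone = (
--         phone.strip()
--         .removeprefix("+")
--         .replace("(", "")
--         .replace(")", "")
--         .replace("-", "")
--         .replace(" ", "")
--     )
--     return new_phone
--
-- def get_phone_numbers_for_countries(list_phones):
--     country_phone_numbers = {
--         "UA": [],
--         "JP": [],
--         "TW": [],
--         "SG": []
--     }
--
--     for phone in list_phones:
--         sanitized_phone = sanitize_phone_number(phone)
--         if sanitized_phone.startswith("380"):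
--             country_phone_numbers["UA"].append(sanitized_phone)
--         elif sanitized_phone.startswith("81"):
--             country_phone_numbers["JP"].append(sanitized_phone)
--         elif sanitized_phone.startswith("886"):
--             country_phone_numbers["TW"].append(sanitized_phone)
--         elif sanitized_phone.startswith("65"):
--             country_phone_numbers["SG"].append(sanitized_phone)
--         else:
--             country_phone_numbers["UA"].append(sanitized_phone)
--
--     return country_phone_numbers
-- ===== SOURCE B (Python) =====
-- def sanitize_phone_number(phone):
--     new_phone = (
--         phone.strip()
--         .removeprefix("+")
--         .replace("(", "")
--         .replace(")", "")
--         .replace("-", "")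
--         .replace(" ", "")
--     )
--     return new_phone
--
-- PREFIX_TABLE = (("380", "UA"), ("81", "JP"), ("886", "TW"), ("65", "SG"))
--
-- def classify(s):
--     for prefix, country in PREFIX_TABLE:
--         if s.startswith(prefix):
--             return country
--     return "UA"
--
-- def get_phone_numbers_for_countries(list_phones):
--     sanitized = [sanitize_phone_number(p) for p in list_phones]
--     return {c: [s for s in sanitized if classify(s) == c]
--             for c in ("UA", "JP", "TW", "SG")}
-- ===== Notes on version B (the rewrite author's own statement) =====
-- stated objective: idiomatic
-- what changed: Replaces the single-pass if/elif ladder that mutates dict buckets with a data-driven prefix table plus a classify helper, building each country's bucket as an order-preserving filter of the pre-sanitized list (a dict comprehension over the fixed country order).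
import Mathlib
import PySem

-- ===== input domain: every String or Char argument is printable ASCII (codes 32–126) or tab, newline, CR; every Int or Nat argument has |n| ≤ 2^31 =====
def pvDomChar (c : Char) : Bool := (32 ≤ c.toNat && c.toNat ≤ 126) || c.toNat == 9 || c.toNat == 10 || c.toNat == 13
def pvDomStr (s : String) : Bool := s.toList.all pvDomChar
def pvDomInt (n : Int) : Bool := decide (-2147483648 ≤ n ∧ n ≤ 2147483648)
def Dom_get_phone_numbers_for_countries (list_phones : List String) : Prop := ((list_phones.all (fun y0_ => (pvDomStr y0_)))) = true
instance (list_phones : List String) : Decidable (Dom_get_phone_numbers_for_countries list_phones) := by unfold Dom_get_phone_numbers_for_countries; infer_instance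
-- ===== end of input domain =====

-- B replaces A's if/elif ladder and in-place bucket mutation with a prefix table, a classify
-- helper and per-country filters of the pre-sanitized list (objective: idiomatic; same cost).

-- ===== PORT A =====
-- shared module helper (used verbatim by both A and B); removeprefix("+") is ported by hand
-- as 'if startswith then drop the prefix' — exactly Python's str.removeprefix
def sanitize_phone_number (phone : String) : String :=
  let s0 := PySem.Str.strip phone
  let s1 := if PySem.Str.startswith s0 "+" then PySem.Str.slice s0 (some 1) none else s0
  PySem.Str.replace (PySem.Str.replace (PySem.Str.replace (PySem.Str.replace s1 "(" "") ")" "") "-" "") " " ""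

def get_phone_numbers_for_countries (list_phones : List String) : List (String × List String) :=
  (list_phones.foldl (fun d phone =>
    let s := sanitize_phone_number phone
    if PySem.Str.startswith s "380" then d.modify "UA" [] (· ++ [s])
    else if PySem.Str.startswith s "81" then d.modify "JP" [] (· ++ [s])
    else if PySem.Str.startswith s "886" then d.modify "TW" [] (· ++ [s])
    else if PySem.Str.startswith s "65" then d.modify "SG" [] (· ++ [s])
    else d.modify "UA" [] (· ++ [s]))
    (PySem.Dict.ofList [("UA", []), ("JP", []), ("TW", []), ("SG", [])])).items

-- ===== PORT B =====
def prefix_table : List (String × String) :=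
  [("380", "UA"), ("81", "JP"), ("886", "TW"), ("65", "SG")]

def classify (s : String) : String :=
  match prefix_table.find? (fun pc => PySem.Str.startswith s pc.1) with
  | some pc => pc.2
  | none => "UA"

def get_phone_numbers_for_countries_alt (list_phones : List String) : List (String × List String) :=
  let sanitized := list_phones.map sanitize_phone_number
  ["UA", "JP", "TW", "SG"].map (fun c => (c, sanitized.filter (fun s => classify s == c)))

-- ===== PRECONDITION & SPEC =====
def Spec_get_phone_numbers_for_countries (list_phones : List String) (out : List (String × List String)) : Prop := out = get_phone_numbers_for_countries_alt list_phones
instance (list_phones : List String) (out : List (String × List String)) : Decidable (Spec_get_phone_numbers_for_countries list_phones out) := by unfold Spec_get_phone_numbers_for_countries; infer_instance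

-- ===== CLAIM (what is proved, stated in full; the proofs are below) =====
def Claim_equal_get_phone_numbers_for_countries : Prop := ∀ (list_phones : List String), Dom_get_phone_numbers_for_countries list_phones → Spec_get_phone_numbers_for_countries list_phones (get_phone_numbers_for_countries list_phones)

-- ===== LEMMAS AND PROOFS =====

-- A's loop over the four-key dict, with fully general accumulators, in terms of B's classify
theorem loopA_eq (l : List String) (a b c d : List String) :
    (l.foldl (fun dd phone =>
      let s := sanitize_phone_number phone
      if PySem.Str.startswith s "380" then dd.modify "UA" [] (· ++ [s])
      else if PySem.Str.startswith s "81" then dd.modify "JP" [] (· ++ [s])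
      else if PySem.Str.startswith s "886" then dd.modify "TW" [] (· ++ [s])
      else if PySem.Str.startswith s "65" then dd.modify "SG" [] (· ++ [s])
      else dd.modify "UA" [] (· ++ [s]))
      (PySem.Dict.mk [("UA", a), ("JP", b), ("TW", c), ("SG", d)]))
    = PySem.Dict.mk
        [("UA", a ++ (l.map sanitize_phone_number).filter (fun s => classify s == "UA")),
         ("JP", b ++ (l.map sanitize_phone_number).filter (fun s => classify s == "JP")),
         ("TW", c ++ (l.map sanitize_phone_number).filter (fun s => classify s == "TW")),
         ("SG", d ++ (l.map sanitize_phone_number).filter (fun s => classify s == "SG"))] := by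
  induction l generalizing a b c d with
  | nil => simp
  | cons p l ih =>
    simp only [List.foldl_cons, List.map_cons, List.filter_cons]
    by_cases h380 : PySem.Str.startswith (sanitize_phone_number p) "380" = true
    · rw [if_pos h380,
        show (PySem.Dict.mk [("UA", a), ("JP", b), ("TW", c), ("SG", d)]).modify "UA" []
            (· ++ [sanitize_phone_number p])
          = PySem.Dict.mk [("UA", a ++ [sanitize_phone_number p]), ("JP", b), ("TW", c), ("SG", d)]
          from rfl, ih]
      have hc : classify (sanitize_phone_number p) = "UA" := by
        simp [classify, prefix_table, List.find?, (show PySem.Chars.startswith (sanitize_phone_number p).toList ['3', '8', '0'] = true from by simpa using h380)]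
      simp [hc]
    · rw [if_neg h380]
      by_cases h81 : PySem.Str.startswith (sanitize_phone_number p) "81" = true
      · rw [if_pos h81,
          show (PySem.Dict.mk [("UA", a), ("JP", b), ("TW", c), ("SG", d)]).modify "JP" []
              (· ++ [sanitize_phone_number p])
            = PySem.Dict.mk [("UA", a), ("JP", b ++ [sanitize_phone_number p]), ("TW", c), ("SG", d)]
            from rfl, ih]
        have hc : classify (sanitize_phone_number p) = "JP" := by
          simp [classify, prefix_table, List.find?, (show PySem.Chars.startswith (sanitize_phone_number p).toList ['3', '8', '0'] = false from by simpa using h380), (show PySem.Chars.startswith (sanitize_phone_number p).toList ['8', '1'] = true from by simpa using h81)]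
        simp [hc]
      · rw [if_neg h81]
        by_cases h886 : PySem.Str.startswith (sanitize_phone_number p) "886" = true
        · rw [if_pos h886,
            show (PySem.Dict.mk [("UA", a), ("JP", b), ("TW", c), ("SG", d)]).modify "TW" []
                (· ++ [sanitize_phone_number p])
              = PySem.Dict.mk [("UA", a), ("JP", b), ("TW", c ++ [sanitize_phone_number p]), ("SG", d)]
              from rfl, ih]
          have hc : classify (sanitize_phone_number p) = "TW" := by
            simp [classify, prefix_table, List.find?, (show PySem.Chars.startswith (sanitize_phone_number p).toList ['3', '8', '0'] = false from by simpa using h380), (show PySem.Chars.startswith (sanitize_phone_number p).toList ['8', '1'] = false from by simpa using h81), (show PySem.Chars.startswith (sanitize_phone_number p).toList ['8', '8', '6'] = true from by simpa using h886)]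
          simp [hc]
        · rw [if_neg h886]
          by_cases h65 : PySem.Str.startswith (sanitize_phone_number p) "65" = true
          · rw [if_pos h65,
              show (PySem.Dict.mk [("UA", a), ("JP", b), ("TW", c), ("SG", d)]).modify "SG" []
                  (· ++ [sanitize_phone_number p])
                = PySem.Dict.mk [("UA", a), ("JP", b), ("TW", c), ("SG", d ++ [sanitize_phone_number p])]
                from rfl, ih]
            have hc : classify (sanitize_phone_number p) = "SG" := by
              simp [classify, prefix_table, List.find?, (show PySem.Chars.startswith (sanitize_phone_number p).toList ['3', '8', '0'] = false from by simpa using h380), (show PySem.Chars.startswith (sanitize_phone_number p).toList ['8', '1'] = false from by simpa using h81), (show PySem.Chars.startswith (sanitize_phone_number p).toList ['8', '8', '6'] = false from by simpa using h886), (show PySem.Chars.startswith (sanitize_phone_number p).toList ['6', '5'] = true from by simpa using h65)]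
            simp [hc]
          · rw [if_neg h65,
              show (PySem.Dict.mk [("UA", a), ("JP", b), ("TW", c), ("SG", d)]).modify "UA" []
                  (· ++ [sanitize_phone_number p])
                = PySem.Dict.mk [("UA", a ++ [sanitize_phone_number p]), ("JP", b), ("TW", c), ("SG", d)]
                from rfl, ih]
            have hc : classify (sanitize_phone_number p) = "UA" := by
              simp [classify, prefix_table, List.find?, (show PySem.Chars.startswith (sanitize_phone_number p).toList ['3', '8', '0'] = false from by simpa using h380), (show PySem.Chars.startswith (sanitize_phone_number p).toList ['8', '1'] = false from by simpa using h81), (show PySem.Chars.startswith (sanitize_phone_number p).toList ['8', '8', '6'] = false from by simpa using h886), (show PySem.Chars.startswith (sanitize_phone_number p).toList ['6', '5'] = false from by simpa using h65)]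
            simp [hc]

-- ===== VERDICT (by name: the statement is the Claim_ definition above) =====
theorem get_phone_numbers_for_countries_spec : Claim_equal_get_phone_numbers_for_countries := by
  intro list_phones _
  unfold Spec_get_phone_numbers_for_countries
  unfold get_phone_numbers_for_countries get_phone_numbers_for_countries_alt
  rw [show (PySem.Dict.ofList [("UA", ([] : List String)), ("JP", []), ("TW", []), ("SG", [])])
      = PySem.Dict.mk [("UA", []), ("JP", []), ("TW", []), ("SG", [])] from rfl,
    loopA_eq]
  simp [PySem.Dict.items]
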